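-- pv_equiv track=rewrite | github.com/masx200/parse-openwrt-packages-and-status-and-control | parse-openwrt-status-and-packages-and-control-2023年12月9日 225722.py | merge_dict_not_None
-- ===== SOURCE A (Python) =====
-- def merge_dict_not_None(value, data):
--     d2 = {}
--     for dict1 in [data, value]:
--         for k, v in dict1.items():
--             if k not in d2:
--                 d2[k] = None
--
--             if v != None:
--                 d2[k] = v
--     return d2
-- ===== SOURCE B (Python) =====
-- def merge_dict_not_None(value, data):
--     keys = list(data) + [k for k in value if k not in data]
--
--     def pick(k):
--         if k in value and value[k] != None:
--             return value[k]
--         if k in data and data[k] != None: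
--             return data[k]
--         return None
--
--     return {k: pick(k) for k in keys}
-- ===== Notes on version B (the rewrite author's own statement) =====
-- stated objective: simpler
-- what changed: Replaces the accumulate-and-overwrite double loop over both dicts with a single pass: the key order is built once (data keys, then value-only keys) and each key's result is resolved directly by priority (value[k] if not None, else data[k] if not None, else None).
import Mathlib
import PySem

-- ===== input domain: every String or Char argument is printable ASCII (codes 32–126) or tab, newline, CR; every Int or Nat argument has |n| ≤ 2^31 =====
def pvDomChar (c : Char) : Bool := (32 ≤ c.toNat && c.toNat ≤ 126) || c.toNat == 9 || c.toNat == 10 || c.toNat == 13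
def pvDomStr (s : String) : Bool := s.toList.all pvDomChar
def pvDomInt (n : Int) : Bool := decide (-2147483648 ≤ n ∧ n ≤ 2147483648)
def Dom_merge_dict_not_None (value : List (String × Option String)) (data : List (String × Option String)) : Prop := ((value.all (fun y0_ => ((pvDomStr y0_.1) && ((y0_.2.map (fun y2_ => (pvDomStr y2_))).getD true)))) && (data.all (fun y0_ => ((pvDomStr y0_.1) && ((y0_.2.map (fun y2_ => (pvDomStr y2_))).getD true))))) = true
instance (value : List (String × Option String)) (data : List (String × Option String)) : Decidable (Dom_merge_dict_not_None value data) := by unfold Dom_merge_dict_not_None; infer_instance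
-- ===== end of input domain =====

-- B replaces A's accumulate-and-overwrite double loop by one pass: build the key order once
-- (data keys, then value-only keys) and resolve each key directly by priority
-- (value[k] if not None, else data[k] if not None, else None). Objective: simpler.


-- ===== PORT A =====
-- the body of A's inner loop: if k not in d2: d2[k] = None; if v != None: d2[k] = v
def pvStepA (d2 : PySem.Dict String (Option String)) (kv : String × Option String) : PySem.Dict String (Option String) :=
  let d2' := if d2.contains kv.1 = false then d2.insert kv.1 none else d2
  if kv.2 ≠ none then d2'.insert kv.1 kv.2 else d2'

def merge_dict_not_None (value : List (String × Option String)) (data : List (String × Option String)) : List (String × Option String) :=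
  ([data, value].foldl (fun d2 dict1 => dict1.foldl pvStepA d2) PySem.Dict.empty).items

-- ===== PORT B =====
-- pick(k): value[k] if present and != None, else data[k] if present and != None, else None
def pvPickB (value : List (String × Option String)) (data : List (String × Option String)) (k : String) : Option String :=
  match (PySem.Dict.mk value).get? k with
  | some (some v) => some v
  | _ =>
    match (PySem.Dict.mk data).get? k with
    | some (some w) => some w
    | _ => none

def merge_dict_not_None_alt (value : List (String × Option String)) (data : List (String × Option String)) : List (String × Option String) :=
  let dk := data.map Prod.fst
  let keys := dk ++ (value.map Prod.fst).filter (fun k => !dk.contains k)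
  keys.map (fun k => (k, pvPickB value data k))

-- ===== PRECONDITION & SPEC =====
-- Pre_ excludes association lists with duplicate keys: the Python arguments are dicts, whose keys
-- are necessarily distinct, so a duplicate-key list corresponds to no Python input at all.
def Pre_merge_dict_not_None (value : List (String × Option String)) (data : List (String × Option String)) : Prop :=
  (value.map Prod.fst).Nodup ∧ (data.map Prod.fst).Nodup
instance (value : List (String × Option String)) (data : List (String × Option String)) : Decidable (Pre_merge_dict_not_None value data) := by unfold Pre_merge_dict_not_None; infer_instance

def pvWitness_merge_dict_not_None : (List (String × Option String)) × (List (String × Option String)) :=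
  ([("a", some "x"), ("b", none)], [("b", some "y"), ("c", none)])

def Spec_merge_dict_not_None (value : List (String × Option String)) (data : List (String × Option String)) (out : List (String × Option String)) : Prop := out = merge_dict_not_None_alt value data
instance (value : List (String × Option String)) (data : List (String × Option String)) (out : List (String × Option String)) : Decidable (Spec_merge_dict_not_None value data out) := by unfold Spec_merge_dict_not_None; infer_instance

-- ===== CLAIM (what is proved, stated in full; the proofs are below) =====
def Claim_equal_merge_dict_not_None : Prop := ∀ (value : List (String × Option String)) (data : List (String × Option String)), Dom_merge_dict_not_None value data → Pre_merge_dict_not_None value data → Spec_merge_dict_not_None value data (merge_dict_not_None value data)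

-- ===== LEMMAS AND PROOFS =====

-- the value A's loop has stored for an existing entry p after processing the remaining pairs l:
-- the value from l if that is non-None, else the value p already carries
def pvOv (l : List (String × Option String)) (p : String × Option String) : String × Option String :=
  (p.1, match (PySem.Dict.mk l).get? p.1 with
        | some (some v) => some v
        | _ => p.2)

theorem stepA_eq (d : PySem.Dict String (Option String)) (kv : String × Option String) :
    pvStepA d kv = if kv.2 = none ∧ d.contains kv.1 = true then d else d.insert kv.1 kv.2 := by
  unfold pvStepA
  rcases kv with ⟨k, v⟩
  rcases hc : d.contains k with _ | _ <;> rcases v with _ | w <;>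
    simp_all [PySem.Dict.insert_insert_self]

theorem get?_mk_none (v : List (String × Option String)) (k : String) (h : k ∉ v.map Prod.fst) :
    (PySem.Dict.mk v).get? k = none := by
  rw [PySem.Dict.get?_eq_none_iff_not_mem_keys, PySem.Dict.keys_mk]
  simpa using h

theorem get?_mk_mem (v : List (String × Option String)) (p : String × Option String)
    (hv : (v.map Prod.fst).Nodup) (h : p ∈ v) : (PySem.Dict.mk v).get? p.1 = some p.2 := by
  apply PySem.Dict.get?_of_mem_items
  · exact h
  · rw [PySem.Dict.keys_mk]; simpa using hv

theorem pvOv_cons_ne (k : String) (v : Option String) (t : List (String × Option String))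
    (p : String × Option String) (h : p.1 ≠ k) : pvOv ((k, v) :: t) p = pvOv t p := by
  simp [pvOv, PySem.Dict.get?_mk_cons, Ne.symm h]

theorem pvOv_cons_none (k : String) (t : List (String × Option String))
    (h : k ∉ t.map Prod.fst) (p : String × Option String) :
    pvOv ((k, none) :: t) p = pvOv t p := by
  by_cases hp : p.1 = k
  · simp [pvOv, PySem.Dict.get?_mk_cons, hp, get?_mk_none t k h]
  · exact pvOv_cons_ne k none t p hp

theorem foldl_stepA_items (l : List (String × Option String)) (d : PySem.Dict String (Option String))
    (hl : (l.map Prod.fst).Nodup) (hd : d.keys.Nodup) :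
    (l.foldl pvStepA d).items =
      d.items.map (pvOv l) ++ l.filter (fun p => !d.contains p.1) := by
  induction l generalizing d with
  | nil =>
      have h0 : ∀ p ∈ d.items, pvOv [] p = p :=
        fun p _ => by simp [pvOv, get?_mk_none [] p.1 (by simp)]
      simp [List.map_congr_left h0]
  | cons q t ih =>
      obtain ⟨k, v⟩ := q
      simp only [List.map_cons, List.nodup_cons, List.mem_map] at hl
      obtain ⟨hk, ht⟩ := hl
      have hknot : k ∉ t.map Prod.fst := by simpa using hk
      simp only [List.foldl_cons, stepA_eq]
      by_cases h : v = none ∧ d.contains k = true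
      · rw [if_pos h, ih d ht hd]
        obtain ⟨hv, hc⟩ := h
        subst hv
        rw [List.map_congr_left (fun p _ => (pvOv_cons_none k t hknot p).symm)]
        simp [hc]
      · rw [if_neg h]
        by_cases hc : d.contains k = true
        · have hv : v ≠ none := fun hv => h ⟨hv, hc⟩
          rw [ih (d.insert k v) ht (PySem.Dict.nodup_keys_insert d k v hd)]
          rw [PySem.Dict.items_insert_of_contains d v hc, List.map_map]
          have hmap : ∀ p ∈ d.items,
              (pvOv t ∘ fun p => if p.1 == k then (k, v) else p) p = pvOv ((k, v) :: t) p := by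
            intro p _
            by_cases hp : p.1 = k
            · obtain ⟨w, rfl⟩ := Option.ne_none_iff_exists'.mp hv
              simp [hp, pvOv, PySem.Dict.get?_mk_cons, get?_mk_none t k hknot]
            · simp [hp, pvOv_cons_ne k v t p hp]
          rw [List.map_congr_left hmap]
          have hfilt : t.filter (fun p => !(d.insert k v).contains p.1)
              = t.filter (fun p => !d.contains p.1) := by
            apply List.filter_congr
            intro p hp
            have : p.1 ≠ k := fun hpk => hknot (List.mem_map.mpr ⟨p, hp, hpk⟩)
            simp [PySem.Dict.contains_insert, this]
          rw [hfilt]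
          simp [hc]
        · have hcf : d.contains k = false := by simpa using hc
          rw [ih (d.insert k v) ht (PySem.Dict.nodup_keys_insert d k v hd)]
          rw [PySem.Dict.items_insert_of_not_contains d v hcf, List.map_append]
          have hmap : ∀ p ∈ d.items, pvOv t p = pvOv ((k, v) :: t) p := by
            intro p hp
            have : p.1 ≠ k := by
              intro hpk
              have := PySem.Dict.mem_keys_of_mem_items d hp
              rw [hpk] at this
              rw [PySem.Dict.contains_eq_decide_mem_keys] at hcf
              simp [this] at hcf
            rw [pvOv_cons_ne k v t p this]
          rw [List.map_congr_left hmap]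
          have hov : pvOv t (k, v) = (k, v) := by
            cases v <;> simp [pvOv, get?_mk_none t k hknot]
          have hfilt : t.filter (fun p => !(d.insert k v).contains p.1)
              = t.filter (fun p => !d.contains p.1) := by
            apply List.filter_congr
            intro p hp
            have : p.1 ≠ k := fun hpk => hknot (List.mem_map.mpr ⟨p, hp, hpk⟩)
            simp [PySem.Dict.contains_insert, this]
          rw [hfilt]
          simp [hcf, hov]

theorem merge_eq_alt (value : List (String × Option String)) (data : List (String × Option String))
    (hv : (value.map Prod.fst).Nodup) (hd : (data.map Prod.fst).Nodup) :
    merge_dict_not_None value data = merge_dict_not_None_alt value data := by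
  unfold merge_dict_not_None merge_dict_not_None_alt
  simp only [List.foldl_cons, List.foldl_nil]
  set D1 := data.foldl pvStepA PySem.Dict.empty with hD1
  have hempty : (PySem.Dict.empty : PySem.Dict String (Option String)).keys.Nodup := by
    simp [PySem.Dict.keys_empty]
  have hD1items : D1.items = data := by
    rw [hD1, foldl_stepA_items data _ hd hempty]
    simp [PySem.Dict.empty]
  have hD1nodup : D1.keys.Nodup := by
    simp only [PySem.Dict.keys, hD1items]
    simpa using hd
  have hkeys : D1.keys = data.map Prod.fst := by
    simp only [PySem.Dict.keys, hD1items]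
  rw [foldl_stepA_items value D1 hv hD1nodup, hD1items]
  rw [List.map_append, List.map_map, List.filter_map, List.map_map]
  congr 1
  · apply List.map_congr_left
    intro p hp
    have hgd := get?_mk_mem data p hd hp
    simp only [Function.comp, pvOv, pvPickB, hgd]
    cases hgv : (PySem.Dict.mk value).get? p.1 with
    | none => cases p.2 <;> rfl
    | some w => cases w <;> cases p.2 <;> rfl
  · have hfilt : value.filter (fun p => !D1.contains p.1)
        = value.filter ((fun k => !(data.map Prod.fst).contains k) ∘ Prod.fst) := by
      apply List.filter_congr
      intro p _
      simp [PySem.Dict.contains_eq_decide_mem_keys, hkeys, List.contains_eq_mem]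
    rw [hfilt]
    apply Eq.symm
    have : ∀ p ∈ value.filter ((fun k => !(data.map Prod.fst).contains k) ∘ Prod.fst),
        ((fun k => (k, pvPickB value data k)) ∘ Prod.fst) p = p := by
      intro p hp
      obtain ⟨k0, v0⟩ := p
      have hmem := List.mem_of_mem_filter hp
      have hnd : k0 ∉ data.map Prod.fst := by
        have := List.of_mem_filter hp
        simpa [List.contains_eq_mem] using this
      have hgv := get?_mk_mem value (k0, v0) hv hmem
      simp only [Function.comp, pvPickB, hgv]
      cases v0 with
      | some w => rfl
      | none => simp [get?_mk_none data k0 hnd]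
    rw [List.map_congr_left this]
    simp

-- ===== VERDICT (by name: the statement is the Claim_ definition above) =====
theorem merge_dict_not_None_spec : Claim_equal_merge_dict_not_None := by
  intro value data _ hpre
  exact merge_eq_alt value data hpre.1 hpre.2
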